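-- pv_equiv track=rewrite | github.com/ZIMUQIN-L/REMIN-attack | process_database.py | find_covering_canonical_range
-- ===== SOURCE A (Python) =====
-- def find_covering_canonical_range(canonical_ranges, query):
--     """
--     Find smallest canonical range covering query
--     """
--     qmin0, qmax0, qmin1, qmax1 = query
--     candidates = []
--     for rect in canonical_ranges:
--         min0, max0, min1, max1 = rect
--         if (min0 <= qmin0 and max0 >= qmax0 and
--             min1 <= qmin1 and max1 >= qmax1):
--             candidates.append(rect)
--
--     def area(r): return (r[1]-r[0]+1) * (r[3]-r[2]+1)
--     return min(candidates, key=area)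
-- ===== SOURCE B (Python) =====
-- def find_covering_canonical_range(canonical_ranges, query):
--     """
--     Find smallest canonical range covering query: sort a copy by area
--     (stable, so equal-area rectangles keep original order) and return the
--     first rectangle in ascending-area order that covers the query.
--     """
--     qmin0, qmax0, qmin1, qmax1 = query
--     for rect in sorted(canonical_ranges,
--                        key=lambda r: (r[1] - r[0] + 1) * (r[3] - r[2] + 1)):
--         min0, max0, min1, max1 = rect
--         if (min0 <= qmin0 and max0 >= qmax0 and
--             min1 <= qmin1 and max1 >= qmax1):
--             return rect
--     raise ValueError("no covering canonical range")
-- ===== Notes on version B (the rewrite author's own statement) =====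
-- stated objective: alternative
-- what changed: B sorts a copy of the list by area (stable sort) and returns the first covering rectangle in ascending-area order, instead of A's filter-then-min(key=area); stability makes the tie-breaking identical.
import Mathlib
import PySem

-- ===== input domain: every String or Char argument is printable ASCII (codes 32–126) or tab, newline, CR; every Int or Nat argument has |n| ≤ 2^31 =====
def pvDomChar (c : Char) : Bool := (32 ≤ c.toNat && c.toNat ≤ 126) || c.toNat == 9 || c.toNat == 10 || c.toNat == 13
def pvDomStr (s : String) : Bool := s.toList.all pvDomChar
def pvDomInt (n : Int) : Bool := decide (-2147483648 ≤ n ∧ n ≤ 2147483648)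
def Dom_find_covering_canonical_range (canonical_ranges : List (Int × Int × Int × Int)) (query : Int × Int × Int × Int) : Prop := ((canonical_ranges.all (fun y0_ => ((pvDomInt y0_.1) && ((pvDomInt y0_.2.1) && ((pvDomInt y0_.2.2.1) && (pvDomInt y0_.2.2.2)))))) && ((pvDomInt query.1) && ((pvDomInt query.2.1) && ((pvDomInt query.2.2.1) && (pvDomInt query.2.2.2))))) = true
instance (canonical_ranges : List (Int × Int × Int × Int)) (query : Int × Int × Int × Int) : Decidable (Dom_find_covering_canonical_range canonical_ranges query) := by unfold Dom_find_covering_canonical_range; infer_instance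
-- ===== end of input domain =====

-- B sorts a copy by area (stable) and takes the first covering rectangle, instead of
-- A's filter-then-min(key=area); objective: alternative (same value by stability).

-- ===== PORT A =====
-- A: collect covering rectangles into `candidates`, then min(candidates, key=area).
-- Python's min raises ValueError on an empty sequence: PySem.List.min? returns none
-- exactly there; Pre_ excludes those inputs and the `none` arm is unreachable under it.
def find_covering_canonical_range (canonical_ranges : List (Int × Int × Int × Int)) (query : Int × Int × Int × Int) : Int × Int × Int × Int :=
  match query with
  | (qmin0, qmax0, qmin1, qmax1) =>
    let candidates := canonical_ranges.foldl (fun acc rect =>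
      match rect with
      | (min0, max0, min1, max1) =>
        if min0 ≤ qmin0 ∧ max0 ≥ qmax0 ∧ min1 ≤ qmin1 ∧ max1 ≥ qmax1 then acc ++ [rect] else acc) []
    match PySem.List.min? candidates (fun r => (r.2.1 - r.1 + 1) * (r.2.2.2 - r.2.2.1 + 1)) with
    | some r => r
    | none => (0, 0, 0, 0)   -- Python raises ValueError here; excluded by Pre_

-- ===== PORT B =====
-- B: sorted(canonical_ranges, key=area) (stable), then the first covering rectangle
-- in that order; if none covers, Python B raises ValueError (excluded by Pre_).
def find_covering_canonical_range_alt (canonical_ranges : List (Int × Int × Int × Int)) (query : Int × Int × Int × Int) : Int × Int × Int × Int :=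
  match query with
  | (qmin0, qmax0, qmin1, qmax1) =>
    match (PySem.List.sorted canonical_ranges (fun r => (r.2.1 - r.1 + 1) * (r.2.2.2 - r.2.2.1 + 1)) false).find?
      (fun r => decide (r.1 ≤ qmin0 ∧ r.2.1 ≥ qmax0 ∧ r.2.2.1 ≤ qmin1 ∧ r.2.2.2 ≥ qmax1)) with
    | some r => r
    | none => (0, 0, 0, 0)   -- Python raises ValueError here; excluded by Pre_

-- ===== PRECONDITION & SPEC =====
-- Pre_ excludes exactly the inputs with no covering rectangle, on which Python A
-- (min of an empty sequence) and Python B both raise ValueError.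
def Pre_find_covering_canonical_range (canonical_ranges : List (Int × Int × Int × Int)) (query : Int × Int × Int × Int) : Prop :=
  ∃ r ∈ canonical_ranges, r.1 ≤ query.1 ∧ r.2.1 ≥ query.2.1 ∧ r.2.2.1 ≤ query.2.2.1 ∧ r.2.2.2 ≥ query.2.2.2
instance (canonical_ranges : List (Int × Int × Int × Int)) (query : Int × Int × Int × Int) : Decidable (Pre_find_covering_canonical_range canonical_ranges query) := by unfold Pre_find_covering_canonical_range; infer_instance

def pvWitness_find_covering_canonical_range : (List (Int × Int × Int × Int)) × (Int × Int × Int × Int) :=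
  ([(0, 3, 0, 3), (1, 2, 1, 2)], (1, 2, 1, 2))

def Spec_find_covering_canonical_range (canonical_ranges : List (Int × Int × Int × Int)) (query : Int × Int × Int × Int) (out : Int × Int × Int × Int) : Prop := out = find_covering_canonical_range_alt canonical_ranges query
instance (canonical_ranges : List (Int × Int × Int × Int)) (query : Int × Int × Int × Int) (out : Int × Int × Int × Int) : Decidable (Spec_find_covering_canonical_range canonical_ranges query out) := by unfold Spec_find_covering_canonical_range; infer_instance

-- ===== CLAIM (what is proved, stated in full; the proofs are below) =====
def Claim_equal_find_covering_canonical_range : Prop := ∀ (canonical_ranges : List (Int × Int × Int × Int)) (query : Int × Int × Int × Int), Dom_find_covering_canonical_range canonical_ranges query → Pre_find_covering_canonical_range canonical_ranges query → Spec_find_covering_canonical_range canonical_ranges query (find_covering_canonical_range canonical_ranges query)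

-- ===== LEMMAS AND PROOFS =====

-- A's append-if loop builds exactly the filtered list.
lemma foldl_append_if_eq_filter {α : Type} (p : α → Bool) :
    ∀ (xs acc : List α),
      xs.foldl (fun acc x => if p x then acc ++ [x] else acc) acc = acc ++ xs.filter p := by
  intro xs
  induction xs with
  | nil => intro acc; simp
  | cons x t ih =>
    intro acc
    by_cases h : p x <;> simp [h, ih]

-- insertBy puts x in front when its key is strictly below every key in the list.
lemma insertBy_eq_cons {α : Type} (key : α → Int) (x : α) :
    ∀ (zs : List α), (∀ z ∈ zs, key x < key z) →
      PySem.List.insertBy (fun a b => decide (key a < key b)) x zs = x :: zs := by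
  intro zs h
  cases zs with
  | nil => rfl
  | cons z t => simp [PySem.List.insertBy, h z (by simp)]

-- insertBy preserves key-sortedness.
lemma pairwise_insertBy {α : Type} (key : α → Int) (x : α) :
    ∀ (ys : List α), ys.Pairwise (fun a b => key a ≤ key b) →
      (PySem.List.insertBy (fun a b => decide (key a < key b)) x ys).Pairwise
        (fun a b => key a ≤ key b) := by
  intro ys
  induction ys with
  | nil => intro _; simp [PySem.List.insertBy]
  | cons y t ih =>
    intro h
    rcases List.pairwise_cons.mp h with ⟨hy, ht⟩
    by_cases hlt : key x < key y
    · rw [show PySem.List.insertBy (fun a b => decide (key a < key b)) x (y :: t) = x :: y :: t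
          from by simp [PySem.List.insertBy, hlt]]
      refine List.pairwise_cons.mpr ⟨?_, h⟩
      intro z hz
      rcases List.mem_cons.mp hz with rfl | hz
      · exact le_of_lt hlt
      · exact le_of_lt (lt_of_lt_of_le hlt (hy z hz))
    · rw [show PySem.List.insertBy (fun a b => decide (key a < key b)) x (y :: t) =
            y :: PySem.List.insertBy (fun a b => decide (key a < key b)) x t
          from by simp [PySem.List.insertBy, hlt]]
      refine List.pairwise_cons.mpr ⟨?_, ih ht⟩
      intro z hz
      rcases (PySem.List.mem_insertBy _ _ _ _).mp hz with rfl | hz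
      · exact le_of_not_gt hlt
      · exact hy z hz

-- filter commutes with inserting into a key-sorted list.
lemma filter_insertBy {α : Type} (key : α → Int) (p : α → Bool) (x : α) :
    ∀ (ys : List α), ys.Pairwise (fun a b => key a ≤ key b) →
      (PySem.List.insertBy (fun a b => decide (key a < key b)) x ys).filter p =
        if p x then PySem.List.insertBy (fun a b => decide (key a < key b)) x (ys.filter p)
        else ys.filter p := by
  intro ys
  induction ys with
  | nil =>
    intro _
    by_cases hp : p x <;> simp [PySem.List.insertBy, hp]
  | cons y t ih =>
    intro h
    rcases List.pairwise_cons.mp h with ⟨hy, ht⟩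
    by_cases hlt : key x < key y
    · rw [show PySem.List.insertBy (fun a b => decide (key a < key b)) x (y :: t) = x :: y :: t
          from by simp [PySem.List.insertBy, hlt]]
      by_cases hp : p x
      · rw [List.filter_cons_of_pos hp, if_pos hp,
            insertBy_eq_cons key x ((y :: t).filter p) ?_]
        intro z hz
        rcases List.mem_filter.mp hz with ⟨hz, _⟩
        rcases List.mem_cons.mp hz with rfl | hz
        · exact hlt
        · exact lt_of_lt_of_le hlt (hy z hz)
      · rw [List.filter_cons_of_neg hp, if_neg hp]
    · rw [show PySem.List.insertBy (fun a b => decide (key a < key b)) x (y :: t) =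
            y :: PySem.List.insertBy (fun a b => decide (key a < key b)) x t
          from by simp [PySem.List.insertBy, hlt]]
      by_cases hpy : p y
      · rw [List.filter_cons_of_pos hpy, List.filter_cons_of_pos hpy, ih ht]
        by_cases hp : p x
        · rw [if_pos hp, if_pos hp,
              show PySem.List.insertBy (fun a b => decide (key a < key b)) x (y :: t.filter p) =
                y :: PySem.List.insertBy (fun a b => decide (key a < key b)) x (t.filter p)
              from by simp [PySem.List.insertBy, hlt]]
        · rw [if_neg hp, if_neg hp]
      · rw [List.filter_cons_of_neg hpy, List.filter_cons_of_neg hpy, ih ht]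

-- filtering the insertion-sort fold is the fold of the filtered input.
lemma filter_foldl_insertBy {α : Type} (key : α → Int) (p : α → Bool) :
    ∀ (xs acc : List α), acc.Pairwise (fun a b => key a ≤ key b) →
      (xs.foldl (fun acc x => PySem.List.insertBy (fun a b => decide (key a < key b)) x acc) acc).filter p =
        (xs.filter p).foldl (fun acc x => PySem.List.insertBy (fun a b => decide (key a < key b)) x acc) (acc.filter p) := by
  intro xs
  induction xs with
  | nil => intro acc _; rfl
  | cons x t ih =>
    intro acc hacc
    simp only [List.foldl_cons, List.filter_cons]
    by_cases hp : p x
    · rw [ih _ (pairwise_insertBy key x acc hacc), filter_insertBy key p x acc hacc, if_pos hp]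
      simp [hp]
    · rw [ih _ (pairwise_insertBy key x acc hacc), filter_insertBy key p x acc hacc, if_neg hp]
      simp [hp]

-- the head of the insertion-sort fold is the running strict-min of the input.
lemma head_foldl_insertBy {α : Type} (key : α → Int) :
    ∀ (xs acc : List α),
      (xs.foldl (fun acc x => PySem.List.insertBy (fun a b => decide (key a < key b)) x acc) acc).head? =
        xs.foldl (fun b y => match b with
          | none => some y
          | some m => if key y < key m then some y else some m) acc.head? := by
  intro xs
  induction xs with
  | nil => intro acc; rfl
  | cons x t ih =>
    intro acc
    simp only [List.foldl_cons]
    rw [ih]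
    congr 1
    cases acc with
    | nil => rfl
    | cons a u =>
      by_cases hlt : key x < key a <;> simp [PySem.List.insertBy, hlt]

-- find? is the head of the filtered list.
lemma find?_eq_head_filter {α : Type} (p : α → Bool) :
    ∀ (xs : List α), xs.find? p = (xs.filter p).head? := by
  intro xs
  induction xs with
  | nil => rfl
  | cons x t ih =>
    cases hp : p x with
    | true => simp [hp]
    | false =>
      rw [List.find?_cons_of_neg (by simp [hp]), List.filter_cons_of_neg (by simp [hp]), ih]

-- MAIN: first match in the area-sorted list = min-by-area of the matches.
lemma find_sorted_eq_min_filter {α : Type} (key : α → Int) (p : α → Bool) (xs : List α) :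
    (PySem.List.sorted xs key false).find? p = PySem.List.min? (xs.filter p) key := by
  rw [PySem.List.sorted_eq_foldl_insertBy, find?_eq_head_filter,
      filter_foldl_insertBy key p xs [] (by simp)]
  show _ = PySem.List.min? (xs.filter p) key
  rw [show PySem.List.min? (xs.filter p) key =
        (xs.filter p).foldl (fun b y => match b with
          | none => some y
          | some m => if key y < key m then some y else some m) none from rfl]
  exact head_foldl_insertBy key (xs.filter p) []

-- ===== VERDICT (by name: the statement is the Claim_ definition above) =====
theorem find_covering_canonical_range_spec : Claim_equal_find_covering_canonical_range := by
  intro l q _ _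
  rcases q with ⟨qmin0, qmax0, qmin1, qmax1⟩
  unfold Spec_find_covering_canonical_range find_covering_canonical_range find_covering_canonical_range_alt
  dsimp only
  rw [find_sorted_eq_min_filter]
  have hfold :
      (l.foldl (fun acc rect =>
        match rect with
        | (min0, max0, min1, max1) =>
          if min0 ≤ qmin0 ∧ max0 ≥ qmax0 ∧ min1 ≤ qmin1 ∧ max1 ≥ qmax1 then acc ++ [rect] else acc)
        ([] : List (Int × Int × Int × Int))) =
      l.filter (fun r => decide (r.1 ≤ qmin0 ∧ r.2.1 ≥ qmax0 ∧ r.2.2.1 ≤ qmin1 ∧ r.2.2.2 ≥ qmax1)) := by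
    have h := foldl_append_if_eq_filter
      (fun r : Int × Int × Int × Int =>
        decide (r.1 ≤ qmin0 ∧ r.2.1 ≥ qmax0 ∧ r.2.2.1 ≤ qmin1 ∧ r.2.2.2 ≥ qmax1)) l []
    simp only [List.nil_append] at h
    rw [← h]
    congr 1
    funext acc r
    rcases r with ⟨a, b, c, d⟩
    simp
  rw [hfold]
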